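-- pv_equiv track=rewrite | github.com/movie42/algorithm_py | solution/step0/theCandyWar.py | teacher
-- ===== SOURCE A (Python) =====
-- def teacher(N, candy):
--     tem_lst = [0 for i in range(N)]
--     for i in range(N):
--         if candy[i] % 2:
--             candy[i] += 1
--         candy[i] //= 2
--         tem_lst[(i+1) % N] += candy[i]
--
--     for i in range(N):
--         candy[i] += tem_lst[i]
--
--     return candy
-- ===== SOURCE B (Python) =====
-- def teacher(N, candy):
--     if N > 0:
--         prev = (candy[N - 1] + 1) // 2
--         for i in range(N):
--             h = (candy[i] + 1) // 2
--             candy[i] = h + prev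
--             prev = h
--     return candy
-- ===== Notes on version B (the rewrite author's own statement) =====
-- stated objective: simpler
-- what changed: Replaces A's two staged passes with an auxiliary tem_lst (scatter halves forward, then add back) by a single in-place streaming pass that carries the previous neighbor's half in one scalar accumulator seeded with the last element's half, allocating no auxiliary list; (c+1)//2 equals A's odd/even halving.
import Mathlib
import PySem

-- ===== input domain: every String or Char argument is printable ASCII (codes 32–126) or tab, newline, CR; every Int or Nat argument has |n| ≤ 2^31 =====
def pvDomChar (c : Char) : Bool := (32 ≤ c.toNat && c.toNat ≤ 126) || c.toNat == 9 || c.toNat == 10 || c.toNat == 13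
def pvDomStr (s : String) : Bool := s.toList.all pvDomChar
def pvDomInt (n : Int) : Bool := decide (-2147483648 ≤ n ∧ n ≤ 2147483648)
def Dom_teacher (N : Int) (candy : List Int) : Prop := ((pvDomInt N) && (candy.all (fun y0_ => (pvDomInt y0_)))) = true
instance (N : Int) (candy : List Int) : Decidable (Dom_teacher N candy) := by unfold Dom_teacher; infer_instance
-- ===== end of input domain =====

-- B replaces A's two staged passes with an auxiliary tem_lst by one in-place streaming
-- pass carrying the previous neighbor's half in a scalar accumulator; in Python both
-- mutate `candy` in place to the same final contents, and the theorems here are about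
-- the returned value.

-- ===== PORT A =====
def teacherStep1 (N : Int) (st : List Int × List Int) (i : Int) : List Int × List Int :=
  let c0 := PySem.List.pyGetD st.1 i 0
  let c1 := if PySem.Int.mod c0 2 ≠ 0 then c0 + 1 else c0
  let c2 := PySem.Int.floordiv c1 2
  let candy' := PySem.List.pySetD st.1 i c2
  let j := PySem.Int.mod (i + 1) N
  let tem' := PySem.List.pySetD st.2 j (PySem.List.pyGetD st.2 j 0 + c2)
  (candy', tem')

def teacher (N : Int) (candy : List Int) : List Int :=
  let tem0 : List Int := (PySem.List.pyRange 0 N 1).map (fun _ => 0)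
  let st := (PySem.List.pyRange 0 N 1).foldl (teacherStep1 N) (candy, tem0)
  (PySem.List.pyRange 0 N 1).foldl
    (fun c i => PySem.List.pySetD c i (PySem.List.pyGetD c i 0 + PySem.List.pyGetD st.2 i 0)) st.1

-- ===== PORT B =====
-- single pass: the scalar accumulator st.2 holds the half of the previous element
-- (seeded with the half of candy[N-1]); each step writes h + prev and passes h on.
def teacher_alt (N : Int) (candy : List Int) : List Int :=
  if 0 < N then
    ((PySem.List.pyRange 0 N 1).foldl
      (fun (st : List Int × Int) i =>
        let h := PySem.Int.floordiv (PySem.List.pyGetD st.1 i 0 + 1) 2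
        (PySem.List.pySetD st.1 i (h + st.2), h))
      (candy, PySem.Int.floordiv (PySem.List.pyGetD candy (N - 1) 0 + 1) 2)).1
  else candy

-- ===== PRECONDITION & SPEC =====
-- Python A raises IndexError exactly when N > len(candy) (both loops index candy[0..N-1]).
def Pre_teacher (N : Int) (candy : List Int) : Prop := N ≤ (candy.length : Int)
instance (N : Int) (candy : List Int) : Decidable (Pre_teacher N candy) := by
  unfold Pre_teacher; infer_instance

def pvWitness_teacher : Int × List Int := (3, [1, 2, 3])

def Spec_teacher (N : Int) (candy : List Int) (out : List Int) : Prop := out = teacher_alt N candy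
instance (N : Int) (candy : List Int) (out : List Int) : Decidable (Spec_teacher N candy out) := by
  unfold Spec_teacher; infer_instance

-- ===== CLAIM (what is proved, stated in full; the proofs are below) =====
def Claim_equal_teacher : Prop := ∀ (N : Int) (candy : List Int),
  Dom_teacher N candy → Pre_teacher N candy → Spec_teacher N candy (teacher N candy)

-- ===== LEMMAS AND PROOFS =====

-- ceil(c/2), the value A stores into candy[k] and B's per-step h
def hv (candy : List Int) (k : Nat) : Int := PySem.Int.floordiv (candy.getD k 0 + 1) 2

-- A's conditional bump-then-halve is ceiling division by 2.
theorem halfA_eq (c : Int) :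
    PySem.Int.floordiv (if PySem.Int.mod c 2 ≠ 0 then c + 1 else c) 2 =
      PySem.Int.floordiv (c + 1) 2 := by
  rw [PySem.Int.mod_eq_emod_of_pos (b := 2) (by norm_num)]
  rw [PySem.Int.floordiv_eq_ediv_of_pos (b := 2) (by norm_num),
      PySem.Int.floordiv_eq_ediv_of_pos (b := 2) (by norm_num)]
  split_ifs with h <;> omega

theorem pv_getD_set_eq (xs : List Int) (i : Nat) (v : Int) (h : i < xs.length) :
    (xs.set i v).getD i 0 = v := by
  simp [List.getD_eq_getElem?_getD, h]

theorem pv_getD_set_ne (xs : List Int) (i k : Nat) (v : Int) (h : k ≠ i) :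
    (xs.set i v).getD k 0 = xs.getD k 0 := by
  simp [List.getD_eq_getElem?_getD, Ne.symm h]

theorem pv_list_eq_of_getD (xs ys : List Int) (hl : xs.length = ys.length)
    (h : ∀ k, k < xs.length → xs.getD k 0 = ys.getD k 0) : xs = ys := by
  apply List.ext_getElem hl
  intro k h1 h2
  have := h k h1
  simpa [List.getD_eq_getElem?_getD, List.getElem?_eq_getElem, h1, h2] using this

theorem pv_tem0 (n : Nat) :
    ((PySem.List.pyRange 0 (n : Int) 1).map (fun _ => (0:Int))) = List.replicate n 0 := by
  apply List.eq_replicate_iff.2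
  refine ⟨by simp [PySem.List.length_pyRange_one], ?_⟩
  intro b hb; simp at hb; exact hb.2

theorem pv_modF1 (n m : Nat) (h0 : 0 < n) (h1 : m < n) : ((m+1) % n + n - 1) % n = m := by
  rcases Nat.lt_or_ge (m+1) n with h | h
  · rw [Nat.mod_eq_of_lt h]
    have : m + 1 + n - 1 = m + n := by omega
    rw [this, Nat.add_mod_right, Nat.mod_eq_of_lt h1]
  · have hmn : m + 1 = n := by omega
    rw [hmn, Nat.mod_self]
    have : 0 + n - 1 = n - 1 := by omega
    rw [this, Nat.mod_eq_of_lt (by omega)]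
    omega

theorem pv_modF2 (n m k : Nat) (h0 : 0 < n) (h1 : m < n) (hk : k < n)
    (hne : k ≠ (m+1)%n) : (k+n-1)%n ≠ m := by
  intro hEq
  apply hne
  have h2 : (k + n - 1 + 1) % n = ((k+n-1)%n + 1 % n) % n := Nat.add_mod _ _ _
  have h3 : k + n - 1 + 1 = k + n := by omega
  rcases Nat.lt_or_ge 1 n with hn1 | hn1
  · rw [h3, Nat.add_mod_right, Nat.mod_eq_of_lt hk] at h2
    rw [hEq, Nat.mod_eq_of_lt hn1] at h2
    exact h2
  · have hn' : n = 1 := by omega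
    subst hn'
    simp [Nat.mod_one] at hne ⊢
    omega

-- state of A's first loop after m iterations
theorem loopA1 (candy : List Int) (n : Nat) (h0 : 0 < n) (hlen : n ≤ candy.length) :
    ∀ m : Nat, m ≤ n →
      (((PySem.List.pyRange 0 (m:Int) 1).foldl (teacherStep1 (n:Int)) (candy, List.replicate n 0)).1.length = candy.length) ∧
      (((PySem.List.pyRange 0 (m:Int) 1).foldl (teacherStep1 (n:Int)) (candy, List.replicate n 0)).2.length = n) ∧
      (∀ k : Nat, ((PySem.List.pyRange 0 (m:Int) 1).foldl (teacherStep1 (n:Int)) (candy, List.replicate n 0)).1.getD k 0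
          = if k < m then hv candy k else candy.getD k 0) ∧
      (∀ k : Nat, k < n → ((PySem.List.pyRange 0 (m:Int) 1).foldl (teacherStep1 (n:Int)) (candy, List.replicate n 0)).2.getD k 0
          = if (k + n - 1) % n < m then hv candy ((k+n-1)%n) else 0) := by
  intro m
  induction m with
  | zero =>
      intro _
      rw [PySem.List.pyRange_one_eq_nil (by norm_num)]
      simp
  | succ m ih =>
      intro hm1
      obtain ⟨ih1, ih2, ih3, ih4⟩ := ih (by omega)
      have hcast : ((m+1 : Nat) : Int) = (m:Int) + 1 := by push_cast; ring
      rw [hcast, PySem.List.pyRange_one_succ_right (by positivity), List.foldl_append]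
      simp only [List.foldl_cons, List.foldl_nil]
      set st := (PySem.List.pyRange 0 (m:Int) 1).foldl (teacherStep1 (n:Int)) (candy, List.replicate n 0) with hst
      have hread : st.1.getD m 0 = candy.getD m 0 := by rw [ih3 m]; simp
      have hrd2 : st.2.getD ((m+1)%n) 0 = 0 := by
        rw [ih4 _ (Nat.mod_lt _ h0), pv_modF1 n m h0 (by omega)]
        simp
      have hstep : teacherStep1 (n:Int) st (m:Int) =
          (st.1.set m (hv candy m), st.2.set ((m+1)%n) (hv candy m)) := by
        simp only [teacherStep1]
        have hmod : PySem.Int.mod ((m:Int)+1) (n:Int) = (((m+1)%n : Nat) : Int) := by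
          rw [show ((m:Int)+1) = ((m+1 : Nat):Int) by push_cast; ring]
          exact PySem.Int.mod_natCast _ _
        rw [hmod]
        simp only [PySem.List.pyGetD_natCast, PySem.List.pySetD_natCast, hread, hrd2, halfA_eq]
        rw [zero_add]
        rfl
      rw [hstep]
      refine ⟨by simpa using ih1, by simpa using ih2, ?_, ?_⟩
      · intro k
        rcases eq_or_ne k m with rfl | hk
        · rw [pv_getD_set_eq _ _ _ (by omega)]
          simp
        · rw [pv_getD_set_ne _ _ _ _ hk, ih3 k]
          have : k < m + 1 ↔ k < m := by omega
          simp [this]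
      · intro k hk
        rcases eq_or_ne k ((m+1)%n) with rfl | hkj
        · rw [pv_getD_set_eq _ _ _ (by omega), pv_modF1 n m h0 (by omega)]
          simp
        · rw [pv_getD_set_ne _ _ _ _ hkj, ih4 k hk]
          have hne := pv_modF2 n m k h0 (by omega) hk hkj
          have : (k + n - 1) % n < m + 1 ↔ (k + n - 1) % n < m := by omega
          simp [this]

-- state of A's second (add-back) loop after m iterations
theorem loopA2 (base tem : List Int) (n : Nat) (hlen : n ≤ base.length) :
    ∀ m : Nat, m ≤ n →
      (((PySem.List.pyRange 0 (m:Int) 1).foldl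
          (fun c i => PySem.List.pySetD c i (PySem.List.pyGetD c i 0 + PySem.List.pyGetD tem i 0)) base).length = base.length) ∧
      (∀ k : Nat, ((PySem.List.pyRange 0 (m:Int) 1).foldl
          (fun c i => PySem.List.pySetD c i (PySem.List.pyGetD c i 0 + PySem.List.pyGetD tem i 0)) base).getD k 0
        = if k < m then base.getD k 0 + tem.getD k 0 else base.getD k 0) := by
  intro m
  induction m with
  | zero =>
      intro _
      rw [PySem.List.pyRange_one_eq_nil (by norm_num)]
      simp
  | succ m ih =>
      intro hm1
      obtain ⟨ih1, ih2⟩ := ih (by omega)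
      have hcast : ((m+1 : Nat) : Int) = (m:Int) + 1 := by push_cast; ring
      rw [hcast, PySem.List.pyRange_one_succ_right (by positivity), List.foldl_append]
      simp only [List.foldl_cons, List.foldl_nil]
      set res := (PySem.List.pyRange 0 (m:Int) 1).foldl
          (fun c i => PySem.List.pySetD c i (PySem.List.pyGetD c i 0 + PySem.List.pyGetD tem i 0)) base with hres
      have hread : res.getD m 0 = base.getD m 0 := by rw [ih2 m]; simp
      simp only [PySem.List.pyGetD_natCast, PySem.List.pySetD_natCast, hread]
      refine ⟨by simpa using ih1, ?_⟩
      intro k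
      rcases eq_or_ne k m with rfl | hk
      · rw [pv_getD_set_eq _ _ _ (by omega)]
        simp
      · rw [pv_getD_set_ne _ _ _ _ hk, ih2 k]
        have : k < m + 1 ↔ k < m := by omega
        simp [this]

-- predecessor half carried by B's accumulator at step m
def prevB (candy : List Int) (n m : Nat) : Int :=
  if m = 0 then hv candy (n - 1) else hv candy (m - 1)

-- state of B's streaming pass after m iterations: list and accumulator
theorem loopB (candy : List Int) (n : Nat) (hlen : n ≤ candy.length) :
    ∀ m : Nat, m ≤ n →
      (((PySem.List.pyRange 0 (m:Int) 1).foldl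
          (fun (st : List Int × Int) i =>
            let h := PySem.Int.floordiv (PySem.List.pyGetD st.1 i 0 + 1) 2
            (PySem.List.pySetD st.1 i (h + st.2), h))
          (candy, hv candy (n-1))).1.length = candy.length) ∧
      (((PySem.List.pyRange 0 (m:Int) 1).foldl
          (fun (st : List Int × Int) i =>
            let h := PySem.Int.floordiv (PySem.List.pyGetD st.1 i 0 + 1) 2
            (PySem.List.pySetD st.1 i (h + st.2), h))
          (candy, hv candy (n-1))).2 = prevB candy n m) ∧
      (∀ k : Nat, ((PySem.List.pyRange 0 (m:Int) 1).foldl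
          (fun (st : List Int × Int) i =>
            let h := PySem.Int.floordiv (PySem.List.pyGetD st.1 i 0 + 1) 2
            (PySem.List.pySetD st.1 i (h + st.2), h))
          (candy, hv candy (n-1))).1.getD k 0
        = if k < m then hv candy k + prevB candy n k else candy.getD k 0) := by
  intro m
  induction m with
  | zero =>
      intro _
      rw [PySem.List.pyRange_one_eq_nil (by norm_num)]
      simp [prevB]
  | succ m ih =>
      intro hm1
      obtain ⟨ih1, ih2, ih3⟩ := ih (by omega)
      have hcast : ((m+1 : Nat) : Int) = (m:Int) + 1 := by push_cast; ring
      rw [hcast, PySem.List.pyRange_one_succ_right (by positivity), List.foldl_append]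
      simp only [List.foldl_cons, List.foldl_nil]
      set st := (PySem.List.pyRange 0 (m:Int) 1).foldl
          (fun (st : List Int × Int) i =>
            let h := PySem.Int.floordiv (PySem.List.pyGetD st.1 i 0 + 1) 2
            (PySem.List.pySetD st.1 i (h + st.2), h))
          (candy, hv candy (n-1)) with hst
      have hread : st.1.getD m 0 = candy.getD m 0 := by rw [ih3 m]; simp
      simp only [PySem.List.pyGetD_natCast, PySem.List.pySetD_natCast, hread, ih2]
      refine ⟨by simpa using ih1, ?_, ?_⟩
      · simp only [prevB, if_neg (Nat.succ_ne_zero m), Nat.add_sub_cancel]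
        rfl
      · intro k
        rcases eq_or_ne k m with rfl | hk
        · rw [pv_getD_set_eq _ _ _ (by omega), if_pos (Nat.lt_succ_self _)]
          rfl
        · rw [pv_getD_set_ne _ _ _ _ hk, ih3 k]
          have : k < m + 1 ↔ k < m := by omega
          simp [this]

-- ===== VERDICT (by name: the statement is the Claim_ definition above) =====
theorem teacher_spec : Claim_equal_teacher := by
  intro N candy _ hpre
  unfold Spec_teacher
  by_cases hN : N ≤ 0
  · rw [show teacher_alt N candy = candy by simp [teacher_alt, not_lt.2 hN]]
    simp [teacher, PySem.List.pyRange_one_eq_nil hN]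
  · obtain ⟨n, rfl⟩ : ∃ n : Nat, N = (n : Int) := ⟨N.toNat, by omega⟩
    have h0 : 0 < n := by omega
    have hlen : n ≤ candy.length := by
      unfold Pre_teacher at hpre; omega
    have hseed : PySem.Int.floordiv (PySem.List.pyGetD candy ((n:Int) - 1) 0 + 1) 2
        = hv candy (n-1) := by
      rw [show ((n:Int) - 1) = ((n-1 : Nat) : Int) by omega, PySem.List.pyGetD_natCast]
      rfl
    simp only [teacher, teacher_alt, pv_tem0, if_pos (by exact_mod_cast h0 : (0:Int) < n), hseed]
    obtain ⟨a1, a2, a3, a4⟩ := loopA1 candy n h0 hlen n le_rfl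
    set st := (PySem.List.pyRange 0 (n:Int) 1).foldl (teacherStep1 (n:Int)) (candy, List.replicate n 0) with hst
    obtain ⟨b1, b2⟩ := loopA2 st.1 st.2 n (by omega) n le_rfl
    obtain ⟨c1, _, c3⟩ := loopB candy n hlen n le_rfl
    apply pv_list_eq_of_getD
    · rw [b1, a1, c1]
    · intro k hk
      rw [b1, a1] at hk
      rw [b2 k, c3 k, a3 k]
      by_cases hkn : k < n
      · have hmod_lt : (k + n - 1) % n < n := Nat.mod_lt _ h0
        rw [a4 k hkn, if_pos hmod_lt]
        have hmod : (k + n - 1) % n = if k = 0 then n - 1 else k - 1 := by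
          split_ifs with hk0
          · subst hk0; simp [Nat.mod_eq_of_lt (by omega : n - 1 < n)]
          · have : k + n - 1 = (k - 1) + n := by omega
            rw [this, Nat.add_mod_right, Nat.mod_eq_of_lt (by omega)]
        rw [hmod]
        simp only [if_pos hkn, prevB]
        split_ifs <;> rfl
      · simp [hkn]
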